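-- pv_equiv track=rewrite | github.com/Talareto/x1 | honeynet/report_generator.py | get_timeline_data
-- ===== SOURCE A (Python) =====
-- def get_timeline_data(attacks):
--     """
--     Przygotowuje dane do wykresu czasowego.
--
--     Args:
--         attacks (list): Lista ataków
--
--     Returns:
--         tuple: (labels, data)
--     """
--     timeline = {}
--
--     for attack in attacks:
--         timestamp = attack.get('timestamp', '')
--         if timestamp:
--             # Grupowanie po godzinach
--             hour = timestamp[:13]  # YYYY-MM-DDTHH
--             timeline[hour] = timeline.get(hour, 0) + 1
--
--     # Sortowanie chronologicznie
--     sorted_timeline = sorted(timeline.items())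
--
--     labels = [item[0] for item in sorted_timeline]
--     data = [item[1] for item in sorted_timeline]
--
--     return labels, data
-- ===== SOURCE B (Python) =====
-- def get_timeline_data(attacks):
--     hours = sorted(
--         attack.get('timestamp', '')[:13]
--         for attack in attacks
--         if attack.get('timestamp', '')
--     )
--     labels = []
--     data = []
--     i = 0
--     n = len(hours)
--     while i < n:
--         j = i + 1
--         while j < n and hours[j] == hours[i]:
--             j += 1
--         labels.append(hours[i])
--         data.append(j - i)
--         i = j
--     return labels, data
-- ===== Notes on version B (the rewrite author's own statement) =====
-- stated objective: alternative
-- what changed: Replaces the hash-map accumulator (dict of hour counts, then sort the distinct items) with sorting the raw list of hour prefixes and counting consecutive runs in one pass, maintaining no dictionary.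
import Mathlib
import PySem

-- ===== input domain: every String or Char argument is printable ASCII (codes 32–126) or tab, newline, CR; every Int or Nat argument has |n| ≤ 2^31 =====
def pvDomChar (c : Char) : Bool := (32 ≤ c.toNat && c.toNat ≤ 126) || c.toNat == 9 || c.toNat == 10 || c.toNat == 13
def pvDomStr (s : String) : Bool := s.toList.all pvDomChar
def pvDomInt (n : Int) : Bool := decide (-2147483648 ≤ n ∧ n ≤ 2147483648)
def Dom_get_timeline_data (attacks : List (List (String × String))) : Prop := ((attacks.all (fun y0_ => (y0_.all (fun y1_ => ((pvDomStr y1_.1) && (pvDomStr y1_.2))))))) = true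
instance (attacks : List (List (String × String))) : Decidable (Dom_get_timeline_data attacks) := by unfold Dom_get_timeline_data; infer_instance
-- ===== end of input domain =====

-- B replaces A's dict-of-counts + sort-the-items with sort-the-raw-hour-list + one run-length pass (no dictionary); return value only, neither mutates.

-- ===== PORT A =====
def get_timeline_data (attacks : List (List (String × String))) : List String × List Int :=
  let timeline := attacks.foldl (fun tl attack =>
      let timestamp := (PySem.Dict.mk attack).getD "timestamp" ""
      if timestamp ≠ "" then
        let hour := PySem.Str.slice timestamp none (some 13)
        tl.insert hour (tl.getD hour 0 + 1)
      else tl) PySem.Dict.empty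
  let sorted_timeline := PySem.List.sorted2 timeline.items (fun item => item.1) (fun item => item.2)
  (sorted_timeline.map (fun item => item.1), sorted_timeline.map (fun item => item.2))

-- ===== PORT B =====
-- the outer while loop of Source B: emit (hours[i], j - i) for each maximal run of equal elements
def pvRunsB : List String → List String × List Int
  | [] => ([], [])
  | h :: t =>
    let grp := t.takeWhile (fun x => x == h)      -- inner while: j scans past equal elements
    let rest := t.dropWhile (fun x => x == h)
    let p := pvRunsB rest
    (h :: p.1, ((grp.length : Int) + 1) :: p.2)
termination_by l => l.length
decreasing_by
  have := List.length_dropWhile_le (fun x => x == h) t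
  simp only [List.length_cons]; omega

def get_timeline_data_alt (attacks : List (List (String × String))) : List String × List Int :=
  let hours := PySem.List.sorted (attacks.filterMap (fun attack =>
      let t := (PySem.Dict.mk attack).getD "timestamp" ""
      if t ≠ "" then some (PySem.Str.slice t none (some 13)) else none)) (fun h => h)
  pvRunsB hours

-- ===== PRECONDITION & SPEC =====
def Spec_get_timeline_data (attacks : List (List (String × String))) (out : List String × List Int) : Prop := out = get_timeline_data_alt attacks
instance (attacks : List (List (String × String))) (out : List String × List Int) : Decidable (Spec_get_timeline_data attacks out) := by unfold Spec_get_timeline_data; infer_instance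

-- ===== CLAIM (what is proved, stated in full; the proofs are below) =====
def Claim_equal_get_timeline_data : Prop := ∀ (attacks : List (List (String × String))), Dom_get_timeline_data attacks → Spec_get_timeline_data attacks (get_timeline_data attacks)

-- ===== LEMMAS AND PROOFS =====

-- proof-side mirror of pvRunsB returning the runs as pairs
def pvRuns : List String → List (String × Int)
  | [] => []
  | h :: t =>
    (h, ((t.takeWhile (fun x => x == h)).length : Int) + 1) :: pvRuns (t.dropWhile (fun x => x == h))
termination_by l => l.length
decreasing_by
  have := List.length_dropWhile_le (fun x => x == h) t
  simp only [List.length_cons]; omega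

theorem pvRunsB_eq (l : List String) :
    pvRunsB l = ((pvRuns l).map Prod.fst, (pvRuns l).map Prod.snd) := by
  induction l using pvRuns.induct with
  | case1 => rw [pvRunsB, pvRuns]; rfl
  | case2 h t ih =>
    rw [pvRunsB, pvRuns]
    simp [ih]

theorem mem_fst_pvRuns (l : List String) (k : String) :
    k ∈ (pvRuns l).map Prod.fst ↔ k ∈ l := by
  induction l using pvRuns.induct with
  | case1 => simp [pvRuns]
  | case2 h t ih =>
    rw [pvRuns]
    simp only [List.map_cons, List.mem_cons, ih]
    constructor
    · rintro (rfl | hk)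
      · exact Or.inl rfl
      · exact Or.inr ((List.dropWhile_sublist _).subset hk)
    · rintro (rfl | hk)
      · exact Or.inl rfl
      · rw [← List.takeWhile_append_dropWhile (p := fun x => x == h) (l := t)] at hk
        rcases List.mem_append.mp hk with h1 | h2
        · exact Or.inl (by have := List.mem_takeWhile_imp h1; simpa using this)
        · exact Or.inr h2

theorem pvRuns_sorted_spec (l : List String) (hp : l.Pairwise (· ≤ ·)) :
    (∀ p ∈ pvRuns l, p.2 = (l.count p.1 : Int)) ∧
    ((pvRuns l).map Prod.fst).Pairwise (· < ·) := by
  induction l using pvRuns.induct with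
  | case1 => simp [pvRuns]
  | case2 h t ih =>
    rw [pvRuns]
    set t1 := t.takeWhile (fun x => x == h) with ht1
    set t2 := t.dropWhile (fun x => x == h) with ht2
    have hsplit : t1 ++ t2 = t := List.takeWhile_append_dropWhile
    have hle : ∀ y ∈ t, h ≤ y := (List.pairwise_cons.mp hp).1
    have hall1 : ∀ x ∈ t1, x = h := fun x hx => by simpa using List.mem_takeWhile_imp hx
    have hp2 : t2.Pairwise (· ≤ ·) :=
      List.Pairwise.sublist (List.dropWhile_sublist _) ((List.pairwise_cons.mp hp).2)
    have hlt : ∀ y ∈ t2, h < y := by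
      intro y hy
      have hhy : h ≤ y := hle y ((List.dropWhile_sublist _).subset hy)
      rcases lt_or_eq_of_le hhy with hlty | heq
      · exact hlty
      · exfalso
        cases ht2c : t2 with
        | nil => rw [ht2c] at hy; simp at hy
        | cons x r =>
          have hx : (x == h) = false := by
            have hh := List.head?_dropWhile_not (fun x => x == h) t
            rw [← ht2, ht2c] at hh; simpa using hh
          rw [ht2c] at hy hp2
          rcases List.mem_cons.mp hy with rfl | hyr
          · rw [← heq] at hx; simp at hx
          · have hxy : x ≤ y := ((List.pairwise_cons.mp hp2).1) _ hyr
            have hhx : h ≤ x := hle x ((List.dropWhile_sublist _).subset (ht2c ▸ List.mem_cons_self))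
            have : x = h := le_antisymm (heq ▸ hxy) hhx
            simp [this] at hx
    have ihs := ih hp2
    constructor
    · intro p hpmem
      rcases List.mem_cons.mp hpmem with rfl | hpmem
      · have c1 : t1.count h = t1.length :=
          List.count_eq_length.mpr (fun b hb => by simp [hall1 b hb])
        have c2 : t2.count h = 0 :=
          List.count_eq_zero.mpr (fun hh => lt_irrefl h (hlt h hh))
        have hc : (h :: t).count h = t1.length + 1 := by
          rw [← hsplit]
          simp [List.count_append, c1, c2]
        simp only [hc]
        push_cast
        ring
      · have hv := ihs.1 p hpmem
        have hk2 : p.1 ∈ t2 := (mem_fst_pvRuns t2 p.1).mp (List.mem_map_of_mem hpmem)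
        have hne : p.1 ≠ h := fun e => lt_irrefl h (e ▸ hlt p.1 hk2)
        have c1 : t1.count p.1 = 0 :=
          List.count_eq_zero.mpr (fun hh => hne (hall1 _ hh))
        rw [hv]
        have : (h :: t).count p.1 = t2.count p.1 := by
          rw [← hsplit]
          simp [List.count_append, c1, Ne.symm hne]
        rw [this]
    · simp only [List.map_cons]
      rw [List.pairwise_cons]
      exact ⟨fun k hk => hlt k ((mem_fst_pvRuns t2 k).mp hk), ihs.2⟩

theorem pv_timeline_eq (attacks : List (List (String × String))) (d : PySem.Dict String Int) :
    attacks.foldl (fun tl attack =>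
      let timestamp := (PySem.Dict.mk attack).getD "timestamp" ""
      if timestamp ≠ "" then
        let hour := PySem.Str.slice timestamp none (some 13)
        tl.insert hour (tl.getD hour 0 + 1)
      else tl) d
    = (attacks.filterMap (fun attack =>
        let t := (PySem.Dict.mk attack).getD "timestamp" ""
        if t ≠ "" then some (PySem.Str.slice t none (some 13)) else none)).foldl
        (fun tl hour => tl.insert hour (tl.getD hour 0 + 1)) d := by
  induction attacks generalizing d with
  | nil => rfl
  | cons a rest ih =>
    simp only [List.foldl_cons, List.filterMap_cons]
    by_cases hc : (PySem.Dict.mk a).getD "timestamp" "" ≠ ""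
    · rw [if_pos hc, if_pos hc, List.foldl_cons]
      exact ih _
    · rw [if_neg hc, if_neg hc]
      exact ih _

theorem pv_insertBy_congr {α : Type} (b1 b2 : α → α → Bool) (x : α) :
    ∀ ys : List α, (∀ y ∈ ys, b1 x y = b2 x y) →
    PySem.List.insertBy b1 x ys = PySem.List.insertBy b2 x ys := by
  intro ys
  induction ys with
  | nil => intro _; rfl
  | cons y t ih =>
    intro hy
    simp only [PySem.List.insertBy]
    rw [hy y List.mem_cons_self]
    by_cases hb : b2 x y = true
    · simp [hb]
    · simp only [hb]
      rw [ih (fun z hz => hy z (List.mem_cons_of_mem _ hz))]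

theorem pv_foldl_insertBy_congr {α : Type} (b1 b2 : α → α → Bool) :
    ∀ (l acc : List α),
    (∀ x, x ∈ l ∨ x ∈ acc → ∀ y, y ∈ l ∨ y ∈ acc → b1 x y = b2 x y) →
    l.foldl (fun a x => PySem.List.insertBy b1 x a) acc
      = l.foldl (fun a x => PySem.List.insertBy b2 x a) acc := by
  intro l
  induction l with
  | nil => intro _ _; rfl
  | cons h t ih =>
    intro acc hcmp
    simp only [List.foldl_cons]
    rw [pv_insertBy_congr b1 b2 h acc
      (fun y hy => hcmp h (Or.inl List.mem_cons_self) y (Or.inr hy))]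
    apply ih
    intro x hx y hy
    apply hcmp
    · rcases hx with hx | hx
      · exact Or.inl (List.mem_cons_of_mem _ hx)
      · rcases (PySem.List.mem_insertBy b2 h x acc).mp hx with rfl | hx
        · exact Or.inl List.mem_cons_self
        · exact Or.inr hx
    · rcases hy with hy | hy
      · exact Or.inl (List.mem_cons_of_mem _ hy)
      · rcases (PySem.List.mem_insertBy b2 h y acc).mp hy with rfl | hy
        · exact Or.inl List.mem_cons_self
        · exact Or.inr hy

theorem pv_sorted2_eq_sorted_fst (items : List (String × Int))
    (hinj : ∀ a ∈ items, ∀ b ∈ items, a.1 = b.1 → a = b) :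
    PySem.List.sorted2 items (fun p => p.1) (fun p => p.2)
      = PySem.List.sorted items (fun p => p.1) := by
  rw [PySem.List.sorted_eq_foldl_insertBy, PySem.List.sorted2]
  apply pv_foldl_insertBy_congr
  intro x hx y hy
  rcases hx with hx | hx
  swap; · cases hx
  rcases hy with hy | hy
  swap; · cases hy
  by_cases he : x.1 = y.1
  · have hxy : x = y := hinj x hx y hy he
    subst hxy
    simp
  · rcases lt_or_gt_of_ne he with hl | hg
    · simp [hl]
    · simp [hg, asymm hg]

theorem get_timeline_data_eq (attacks : List (List (String × String))) :
    get_timeline_data attacks = get_timeline_data_alt attacks := by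
  simp only [get_timeline_data, get_timeline_data_alt]
  rw [pv_timeline_eq, PySem.Dict.foldl_insert_getD_add_one_eq_counter]
  set hs0 := attacks.filterMap (fun attack =>
      let t := (PySem.Dict.mk attack).getD "timestamp" ""
      if t ≠ "" then some (PySem.Str.slice t none (some 13)) else none) with hhs0
  set s := PySem.List.sorted hs0 (fun h => h) with hsdef
  have hsp : s.Pairwise (· ≤ ·) := by
    have := PySem.List.sorted_pairwise hs0 (fun h => h)
    simpa using this
  have spec := pvRuns_sorted_spec s hsp
  have hcnt : ∀ k : String, s.count k = hs0.count k :=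
    fun k => (PySem.List.sorted_perm hs0 (fun h => h) false).count_eq k
  have hitems : (PySem.Dict.counter hs0).items
      = (PySem.Set.ofList hs0).map (fun k => (k, (hs0.count k : Int))) :=
    PySem.Dict.items_counter hs0
  have hinj : ∀ a ∈ (PySem.Dict.counter hs0).items, ∀ b ∈ (PySem.Dict.counter hs0).items,
      a.1 = b.1 → a = b := by
    rw [hitems]
    intro a ha b hb he
    rcases List.mem_map.mp ha with ⟨k, _, rfl⟩
    rcases List.mem_map.mp hb with ⟨k', _, rfl⟩
    simp only at he
    rw [he]
  have hmapid : pvRuns s = ((pvRuns s).map Prod.fst).map (fun k => (k, (hs0.count k : Int))) := by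
    rw [List.map_map]
    conv_lhs => rw [← List.map_id (pvRuns s)]
    apply List.map_congr_left
    intro p hpm
    have := spec.1 p hpm
    simp only [id, Function.comp]
    rw [← hcnt p.1, ← this]
  have hnd1 : ((pvRuns s).map Prod.fst).Nodup := spec.2.imp ne_of_lt
  have hpermk : ((pvRuns s).map Prod.fst).Perm (PySem.Set.ofList hs0) := by
    rw [List.perm_ext_iff_of_nodup hnd1 (PySem.Set.nodup_ofList hs0)]
    intro k
    rw [mem_fst_pvRuns, PySem.Set.mem_ofList]
    rw [hsdef, PySem.List.mem_sorted]
  have hperm : (pvRuns s).Perm ((PySem.Dict.counter hs0).items) := by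
    rw [hitems, hmapid]
    exact hpermk.map _
  have hpw : (pvRuns s).Pairwise (fun a b => a.1 < b.1) := (List.pairwise_map).mp spec.2
  have hsorted : PySem.List.sorted2 (PySem.Dict.counter hs0).items
      (fun item => item.1) (fun item => item.2) = pvRuns s := by
    rw [pv_sorted2_eq_sorted_fst _ hinj]
    exact PySem.List.sorted_eq_of_perm_of_pairwise_lt _ _ _ hperm hpw
  rw [hsorted, pvRunsB_eq]

-- ===== VERDICT (by name: the statement is the Claim_ definition above) =====
theorem get_timeline_data_spec : Claim_equal_get_timeline_data := by
  intro attacks _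
  unfold Spec_get_timeline_data
  exact get_timeline_data_eq attacks
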